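-- pv_equiv track=rewrite | github.com/akumar0205/AIBOM | aibom/exporters.py | _finding_metadata_by_source
-- ===== SOURCE A (Python) =====
-- from typing import Any
--
-- def _finding_metadata_by_source(scan_findings: list[dict[str, Any]]) -> dict[str, dict[str, str]]:
--     by_source: dict[str, dict[str, str]] = {}
--     for finding in sorted(
--         scan_findings,
--         key=lambda item: (
--             str(item.get("source_file", "")),
--             str(item.get("id", "")),
--         ),
--     ):
--         source = str(finding.get("source_file", ""))
--         if not source or source in by_source:
--             continue
--         by_source[source] = {
--             "confidence": str(finding.get("confidence", "unknown")),
--             "severity": str(finding.get("severity", "unknown")),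
--             "source_type": str(finding.get("source_type", "unknown")),
--             "finding_id": str(finding.get("id", "unknown")),
--         }
--     return by_source
-- ===== SOURCE B (Python) =====
-- from typing import Any
--
-- def _finding_metadata_by_source(scan_findings: list[dict[str, Any]]) -> dict[str, dict[str, str]]:
--     def best_for(source: str) -> dict[str, Any]:
--         best = None
--         for finding in scan_findings:
--             if str(finding.get("source_file", "")) != source:
--                 continue
--             if best is None or str(finding.get("id", "")) < str(best.get("id", "")):
--                 best = finding
--         return best
--
--     sources = sorted({
--         str(finding.get("source_file", ""))
--         for finding in scan_findings
--         if str(finding.get("source_file", ""))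
--     })
--     return {
--         source: {
--             "confidence": str(best_for(source).get("confidence", "unknown")),
--             "severity": str(best_for(source).get("severity", "unknown")),
--             "source_type": str(best_for(source).get("source_type", "unknown")),
--             "finding_id": str(best_for(source).get("id", "unknown")),
--         }
--         for source in sources
--     }
-- ===== Notes on version B (the rewrite author's own statement) =====
-- stated objective: alternative
-- what changed: Instead of sorting all findings by (source, id) and keeping the first hit per non-empty source, B first collects the sorted set of distinct non-empty sources and then, for each source, does a separate linear scan for its min-id finding (strict < so ties keep the first-in-order finding, matching the stable sort).
import Mathlib
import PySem

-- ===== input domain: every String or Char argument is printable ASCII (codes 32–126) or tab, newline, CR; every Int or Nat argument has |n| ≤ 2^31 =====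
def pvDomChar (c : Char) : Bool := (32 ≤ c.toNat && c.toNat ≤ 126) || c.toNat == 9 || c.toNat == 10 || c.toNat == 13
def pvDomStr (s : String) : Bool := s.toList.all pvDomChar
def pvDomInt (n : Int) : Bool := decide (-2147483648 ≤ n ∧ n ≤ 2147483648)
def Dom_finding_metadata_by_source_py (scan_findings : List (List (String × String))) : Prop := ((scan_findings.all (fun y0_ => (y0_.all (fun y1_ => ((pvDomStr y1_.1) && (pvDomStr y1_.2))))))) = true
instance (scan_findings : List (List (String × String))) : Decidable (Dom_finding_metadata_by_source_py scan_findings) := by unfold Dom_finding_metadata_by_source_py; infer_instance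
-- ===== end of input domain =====

-- B replaces "sort every finding by (source, id), then keep the first per non-empty source" by: collect
-- the sorted set of distinct non-empty sources, then for each source run a separate linear scan for its
-- min-id finding (objective: alternative — no global sort of the findings and no dict at all).

-- shared primitive: finding.get(key, default) on an association-list dict (first match)
def pvGetD (f : List (String × String)) (k dflt : String) : String :=
  match f.find? (fun p => p.1 == k) with
  | some p => p.2
  | none => dflt

def pvSrc (f : List (String × String)) : String := pvGetD f "source_file" ""
def pvId (f : List (String × String)) : String := pvGetD f "id" ""

def pvMeta (f : List (String × String)) : List (String × String) :=
  [("confidence", pvGetD f "confidence" "unknown"),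
   ("severity", pvGetD f "severity" "unknown"),
   ("source_type", pvGetD f "source_type" "unknown"),
   ("finding_id", pvGetD f "id" "unknown")]

-- ===== PORT A =====
def pvAStep (d : PySem.Dict String (List (String × String))) (f : List (String × String)) :
    PySem.Dict String (List (String × String)) :=
  let s := pvSrc f
  if s = "" ∨ d.contains s = true then d else d.insert s (pvMeta f)

def finding_metadata_by_source_py (scan_findings : List (List (String × String))) :
    List (String × List (String × String)) :=
  ((PySem.List.sorted2 scan_findings pvSrc pvId false).foldl pvAStep PySem.Dict.empty).items

-- ===== PORT B =====
-- the inner helper best_for(source): linear scan keeping the min-id finding of that source (strict <)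
def pvBestFor (scan_findings : List (List (String × String))) (source : String) :
    Option (List (String × String)) :=
  scan_findings.foldl
    (fun best f =>
      if pvSrc f ≠ source then best
      else
        match best with
        | none => some f
        | some g => if pvId f < pvId g then some f else best)
    none

def finding_metadata_by_source_py_alt (scan_findings : List (List (String × String))) :
    List (String × List (String × String)) :=
  let sources := PySem.List.sorted
    (PySem.Set.ofList ((scan_findings.filter (fun f => ¬ pvSrc f = "")).map pvSrc))
    (fun s => s) false
  sources.map (fun s => (s, pvMeta ((pvBestFor scan_findings s).getD [])))

-- ===== PRECONDITION & SPEC =====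
def Spec_finding_metadata_by_source_py (scan_findings : List (List (String × String))) (out : List (String × List (String × String))) : Prop := out = finding_metadata_by_source_py_alt scan_findings
instance (scan_findings : List (List (String × String))) (out : List (String × List (String × String))) : Decidable (Spec_finding_metadata_by_source_py scan_findings out) := by unfold Spec_finding_metadata_by_source_py; infer_instance

-- ===== CLAIM (what is proved, stated in full; the proofs are below) =====
def Claim_equal_finding_metadata_by_source_py : Prop := ∀ (scan_findings : List (List (String × String))), Dom_finding_metadata_by_source_py scan_findings → Spec_finding_metadata_by_source_py scan_findings (finding_metadata_by_source_py scan_findings)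

-- ===== LEMMAS AND PROOFS =====

-- the boolean "before" relation sorted2 uses: strict lexicographic on (pvSrc, pvId)
def pvBlt (a b : List (String × String)) : Bool :=
  decide (pvSrc a < pvSrc b) || (!decide (pvSrc b < pvSrc a) && decide (pvId a < pvId b))

-- its complement, as the weak lexicographic order
def pvLexLe (a b : List (String × String)) : Prop :=
  pvSrc a < pvSrc b ∨ (pvSrc a = pvSrc b ∧ pvId a ≤ pvId b)

theorem pvSorted2_eq (xs : List (List (String × String))) :
    PySem.List.sorted2 xs pvSrc pvId false =
      xs.foldl (fun acc x => PySem.List.insertBy pvBlt x acc) [] := rfl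

theorem pvBlt_eq_true_iff (a b : List (String × String)) :
    pvBlt a b = true ↔ (pvSrc a < pvSrc b ∨ (pvSrc a = pvSrc b ∧ pvId a < pvId b)) := by
  unfold pvBlt
  simp only [Bool.or_eq_true, Bool.and_eq_true, Bool.not_eq_true', decide_eq_true_eq,
    decide_eq_false_iff_not, not_lt]
  constructor
  · rintro (h | ⟨h1, h2⟩)
    · exact Or.inl h
    · rcases lt_or_eq_of_le h1 with h | h
      · exact Or.inl h
      · exact Or.inr ⟨h, h2⟩
  · rintro (h | ⟨h1, h2⟩)
    · exact Or.inl h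
    · exact Or.inr ⟨le_of_eq h1, h2⟩

theorem pvBlt_eq_false_iff (a b : List (String × String)) :
    pvBlt a b = false ↔ pvLexLe b a := by
  rw [← Bool.not_eq_true, pvBlt_eq_true_iff]
  unfold pvLexLe
  constructor
  · intro h
    rcases lt_trichotomy (pvSrc a) (pvSrc b) with hs | hs | hs
    · exact absurd (Or.inl hs) h
    · refine Or.inr ⟨hs.symm, ?_⟩
      by_contra hid
      exact h (Or.inr ⟨hs, lt_of_not_ge hid⟩)
    · exact Or.inl hs
  · rintro (h | ⟨h1, h2⟩) (h' | ⟨h1', h2'⟩)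
    · exact absurd h' (not_lt_of_gt h)
    · exact absurd h1' (ne_of_gt h)
    · exact absurd h' (by rw [h1]; exact lt_irrefl _)
    · exact absurd h2' (not_lt_of_ge h2)

theorem pvLexLe_trans {a b c : List (String × String)}
    (h1 : pvLexLe a b) (h2 : pvLexLe b c) : pvLexLe a c := by
  unfold pvLexLe at *
  rcases h1 with h1 | ⟨e1, i1⟩ <;> rcases h2 with h2 | ⟨e2, i2⟩
  · exact Or.inl (lt_trans h1 h2)
  · exact Or.inl (e2 ▸ h1)
  · exact Or.inl (e1 ▸ h2)
  · exact Or.inr ⟨e1.trans e2, le_trans i1 i2⟩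

theorem pvLexLe_src {a b : List (String × String)} (h : pvLexLe a b) : pvSrc a ≤ pvSrc b := by
  rcases h with h | ⟨h, _⟩
  · exact le_of_lt h
  · exact le_of_eq h

theorem pvPairwise_insertBy (x : List (String × String)) (M : List (List (String × String)))
    (h : M.Pairwise pvLexLe) : (PySem.List.insertBy pvBlt x M).Pairwise pvLexLe := by
  induction M with
  | nil => simp [PySem.List.insertBy]
  | cons y ys ih =>
    rcases h with _ | ⟨hy, hys⟩
    by_cases hb : pvBlt x y = true
    · rw [PySem.List.insertBy, if_pos hb]
      have hxy : pvLexLe x y := by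
        rcases (pvBlt_eq_true_iff x y).mp hb with h | ⟨h1, h2⟩
        · exact Or.inl h
        · exact Or.inr ⟨h1, le_of_lt h2⟩
      refine List.Pairwise.cons ?_ (List.Pairwise.cons hy hys)
      intro z hz
      rcases List.mem_cons.mp hz with rfl | hz
      · exact hxy
      · exact pvLexLe_trans hxy (hy z hz)
    · rw [PySem.List.insertBy, if_neg hb]
      refine List.Pairwise.cons ?_ (ih hys)
      intro z hz
      rcases (PySem.List.mem_insertBy pvBlt x z ys).mp hz with hz | hz
      · exact hz ▸ (pvBlt_eq_false_iff x y).mp (Bool.eq_false_iff.mpr hb)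
      · exact hy z hz

theorem pvPairwise_foldl (xs : List (List (String × String)))
    (acc : List (List (String × String))) (hacc : acc.Pairwise pvLexLe) :
    (xs.foldl (fun a x => PySem.List.insertBy pvBlt x a) acc).Pairwise pvLexLe := by
  induction xs generalizing acc with
  | nil => exact hacc
  | cons x xs ih => exact ih _ (pvPairwise_insertBy x acc hacc)

theorem pvPairwise_sorted2 (xs : List (List (String × String))) :
    (PySem.List.sorted2 xs pvSrc pvId false).Pairwise pvLexLe := by
  rw [pvSorted2_eq]; exact pvPairwise_foldl xs [] List.Pairwise.nil

theorem pvFind?_insertBy_of_neg {p : List (String × String) → Bool}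
    (x : List (String × String)) (M : List (List (String × String))) (hx : p x = false) :
    (PySem.List.insertBy pvBlt x M).find? p = M.find? p := by
  induction M with
  | nil => simp [PySem.List.insertBy, List.find?, hx]
  | cons y ys ih =>
    by_cases hb : pvBlt x y = true
    · rw [PySem.List.insertBy, if_pos hb, List.find?, hx]
    · rw [PySem.List.insertBy, if_neg hb, List.find?, List.find?]
      cases hpy : p y
      · simpa [hpy] using ih
      · rfl

-- inserting x (source s) into a (src,id)-sorted list: the first source-s element of the
-- result is x exactly when x's id is strictly smaller than the old first one's
theorem pvFind?_insertBy_min {s : String} (x : List (String × String))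
    (M : List (List (String × String))) (hM : M.Pairwise pvLexLe) (hx : pvSrc x = s) :
    (PySem.List.insertBy pvBlt x M).find? (fun f => pvSrc f == s) =
      match M.find? (fun f => pvSrc f == s) with
      | none => some x
      | some m => if pvId x < pvId m then some x else some m := by
  induction M with
  | nil => simp [PySem.List.insertBy, List.find?, hx]
  | cons y ys ih =>
    rcases hM with _ | ⟨hy, hys⟩
    have hpx : ((fun f => pvSrc f == s) x) = true := by simp [hx]
    by_cases hb : pvBlt x y = true
    · rw [PySem.List.insertBy, if_pos hb]
      have hkey : ∀ z, pvLexLe y z → pvSrc z = s → pvId x < pvId z := by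
        intro z hyz hz
        have hyz' : pvSrc y ≤ pvSrc z := pvLexLe_src hyz
        rcases (pvBlt_eq_true_iff x y).mp hb with h | ⟨h1, h2⟩
        · exact absurd (lt_of_lt_of_le h hyz') (by rw [hx, hz]; exact lt_irrefl s)
        · rcases hyz with h' | ⟨h', hid⟩
          · exact absurd h' (by rw [← h1, hx, hz]; exact lt_irrefl s)
          · exact lt_of_lt_of_le h2 hid
      rw [List.find?_cons_of_pos (p := fun f => pvSrc f == s) (a := x) hpx]
      by_cases hsy : pvSrc y = s
      · rw [List.find?_cons_of_pos (p := fun f => pvSrc f == s) (a := y) (by simp [hsy])]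
        have := hkey y (Or.inr ⟨rfl, le_refl _⟩) hsy
        simp [this]
      · rw [List.find?_cons_of_neg (p := fun f => pvSrc f == s) (a := y) (by simp [hsy])]
        cases hfy : ys.find? (fun f => pvSrc f == s) with
        | none => rfl
        | some m =>
          have hm : pvSrc m = s := by simpa using List.find?_some hfy
          have := hkey m (hy m (List.mem_of_find?_eq_some hfy)) hm
          simp [this]
    · rw [PySem.List.insertBy, if_neg hb]
      have hyx : pvLexLe y x := (pvBlt_eq_false_iff x y).mp (Bool.eq_false_iff.mpr hb)
      by_cases hsy : pvSrc y = s
      · rw [List.find?_cons_of_pos (p := fun f => pvSrc f == s) (a := y) (by simp [hsy]), List.find?_cons_of_pos (p := fun f => pvSrc f == s) (a := y) (by simp [hsy])]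
        have hid : pvId y ≤ pvId x := by
          rcases hyx with h | ⟨_, h⟩
          · exact absurd h (by rw [hsy, hx]; exact lt_irrefl s)
          · exact h
        simp [not_lt_of_ge hid]
      · rw [List.find?_cons_of_neg (p := fun f => pvSrc f == s) (a := y) (by simp [hsy]), List.find?_cons_of_neg (p := fun f => pvSrc f == s) (a := y) (by simp [hsy])]
        exact ih hys

-- ===== B-side: the per-source min scan, characterised against the sorted list =====

theorem pvBestFor_append (xs : List (List (String × String))) (x : List (String × String))
    (s : String) :
    pvBestFor (xs ++ [x]) s =
      if pvSrc x ≠ s then pvBestFor xs s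
      else
        match pvBestFor xs s with
        | none => some x
        | some g => if pvId x < pvId g then some x else pvBestFor xs s := by
  unfold pvBestFor
  rw [List.foldl_append, List.foldl_cons, List.foldl_nil]

-- first source-s element of the sorted list = B's per-source min scan over the raw list
theorem pvMainFind (xs : List (List (String × String))) (s : String) :
    (PySem.List.sorted2 xs pvSrc pvId false).find? (fun f => pvSrc f == s) =
      pvBestFor xs s := by
  induction xs using List.reverseRecOn with
  | nil => simp [PySem.List.sorted2, pvBestFor]
  | append_singleton xs x ih =>
    rw [pvSorted2_eq, List.foldl_append, List.foldl_cons, List.foldl_nil, ← pvSorted2_eq,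
      pvBestFor_append]
    by_cases hx : pvSrc x = s
    · rw [pvFind?_insertBy_min x _ (pvPairwise_sorted2 xs) hx, ih]
      simp only [hx, ne_eq, not_true_eq_false, if_false]
      cases pvBestFor xs s with
      | none => rfl
      | some g => by_cases h : pvId x < pvId g <;> simp [h]
    · rw [pvFind?_insertBy_of_neg x _ (by simpa using hx), ih, if_pos hx]

-- ===== A-side fold: characterisation as a "first new source" scan =====

def pvPickList (M : List (List (String × String))) (seen : List String) :
    List (String × List (String × String)) :=
  match M with
  | [] => []
  | f :: M' =>
    if pvSrc f = "" ∨ pvSrc f ∈ seen then pvPickList M' seen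
    else (pvSrc f, pvMeta f) :: pvPickList M' (pvSrc f :: seen)

theorem pvPickList_congr (M : List (List (String × String))) (seen seen' : List String)
    (h : ∀ t, t ∈ seen ↔ t ∈ seen') : pvPickList M seen = pvPickList M seen' := by
  induction M generalizing seen seen' with
  | nil => rfl
  | cons f M' ih =>
    unfold pvPickList
    by_cases hf : pvSrc f = "" ∨ pvSrc f ∈ seen
    · rw [if_pos hf, if_pos (by rcases hf with hf | hf; exact Or.inl hf; exact Or.inr ((h _).mp hf))]
      exact ih seen seen' h
    · rw [if_neg hf, if_neg (by
        rintro (h1 | h1)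
        · exact hf (Or.inl h1)
        · exact hf (Or.inr ((h _).mpr h1)))]
      exact congrArg _ (ih _ _ (fun t => by simp [h t]))

theorem pvAStep_skip (d : PySem.Dict String (List (String × String)))
    (f : List (String × String)) (h : pvSrc f = "" ∨ d.contains (pvSrc f) = true) :
    pvAStep d f = d := by
  show (if pvSrc f = "" ∨ d.contains (pvSrc f) = true then d else _) = d
  rw [if_pos h]

theorem pvAStep_emit (d : PySem.Dict String (List (String × String)))
    (f : List (String × String)) (h : ¬ (pvSrc f = "" ∨ d.contains (pvSrc f) = true)) :
    pvAStep d f = d.insert (pvSrc f) (pvMeta f) := by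
  show (if pvSrc f = "" ∨ d.contains (pvSrc f) = true then d else _) = _
  rw [if_neg h]

theorem pvItems_foldl_astep (M : List (List (String × String)))
    (d : PySem.Dict String (List (String × String))) :
    (M.foldl pvAStep d).items = d.items ++ pvPickList M d.keys := by
  induction M generalizing d with
  | nil => simp [pvPickList]
  | cons f M' ih =>
    rw [List.foldl_cons]
    by_cases hf : pvSrc f = "" ∨ pvSrc f ∈ d.keys
    · have h' : pvSrc f = "" ∨ d.contains (pvSrc f) = true := by
        rcases hf with hf | hf
        · exact Or.inl hf
        · exact Or.inr ((PySem.Dict.contains_iff_mem_keys _ _).mpr hf)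
      rw [pvAStep_skip d f h', ih, pvPickList, if_pos hf]
    · have hc : d.contains (pvSrc f) = false := by
        rw [← Bool.not_eq_true, PySem.Dict.contains_iff_mem_keys]
        intro h
        exact hf (Or.inr h)
      rw [pvAStep_emit d f (by rintro (h | h); exacts [hf (Or.inl h), absurd (hc ▸ h) Bool.false_ne_true]), ih,
        PySem.Dict.items_insert_of_not_contains _ _ hc,
        PySem.Dict.keys_insert_of_not_contains _ _ hc, pvPickList, if_neg hf,
        pvPickList_congr M' (d.keys ++ [pvSrc f]) (pvSrc f :: d.keys) (fun t => by simp; tauto)]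
      simp

theorem pvMem_pickKeys (M : List (List (String × String))) (seen : List String) (t : String) :
    t ∈ (pvPickList M seen).map Prod.fst ↔ (t ∉ seen ∧ t ≠ "" ∧ ∃ f ∈ M, pvSrc f = t) := by
  induction M generalizing seen with
  | nil => simp [pvPickList]
  | cons f M' ih =>
    unfold pvPickList
    by_cases hf : pvSrc f = "" ∨ pvSrc f ∈ seen
    · rw [if_pos hf, ih]
      constructor
      · rintro ⟨h1, h2, g, hg, h3⟩
        exact ⟨h1, h2, g, List.mem_cons_of_mem _ hg, h3⟩
      · rintro ⟨h1, h2, g, hg, h3⟩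
        rcases List.mem_cons.mp hg with rfl | hg
        · rcases hf with hf | hf
          · exact absurd hf (h3 ▸ h2)
          · exact absurd (h3 ▸ hf) h1
        · exact ⟨h1, h2, g, hg, h3⟩
    · rw [not_or] at hf
      rw [if_neg (by rintro (h | h); exacts [hf.1 h, hf.2 h])]
      rw [List.map_cons, List.mem_cons, ih]
      constructor
      · rintro (rfl | ⟨h1, h2, g, hg, h3⟩)
        · exact ⟨hf.2, hf.1, f, List.mem_cons_self, rfl⟩
        · exact ⟨fun h => h1 (List.mem_cons_of_mem _ h), h2, g, List.mem_cons_of_mem _ hg, h3⟩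
      · rintro ⟨h1, h2, g, hg, h3⟩
        rcases List.mem_cons.mp hg with rfl | hg
        · exact Or.inl h3.symm
        · by_cases ht : t = pvSrc f
          · exact Or.inl ht
          · exact Or.inr ⟨by simp [ht, h1], h2, g, hg, h3⟩

theorem pvNodup_pickKeys (M : List (List (String × String))) (seen : List String) :
    ((pvPickList M seen).map Prod.fst).Nodup := by
  induction M generalizing seen with
  | nil => simp [pvPickList]
  | cons f M' ih =>
    unfold pvPickList
    split_ifs with hf
    · exact ih seen
    · rw [List.map_cons]
      refine List.Nodup.cons ?_ (ih _)
      rw [pvMem_pickKeys]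
      rintro ⟨h1, _, _⟩
      exact h1 (List.mem_cons_self)

theorem pvPickKeys_sublist (M : List (List (String × String))) (seen : List String) :
    ((pvPickList M seen).map Prod.fst).Sublist (M.map pvSrc) := by
  induction M generalizing seen with
  | nil => simp [pvPickList]
  | cons f M' ih =>
    unfold pvPickList
    split_ifs with hf
    · exact (ih seen).trans (List.sublist_cons_self _ _)
    · rw [List.map_cons, List.map_cons]
      exact List.Sublist.cons₂ _ (ih _)

theorem pvPickList_eq_map_find (M : List (List (String × String))) (seen : List String) :
    pvPickList M seen = ((pvPickList M seen).map Prod.fst).map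
      (fun s => (s, pvMeta ((M.find? (fun f => pvSrc f == s)).getD []))) := by
  induction M generalizing seen with
  | nil => rfl
  | cons f M' ih =>
    rw [pvPickList]
    split_ifs with hf
    · have hcong : List.map
          (fun s => (s, pvMeta ((List.find? (fun g => pvSrc g == s) (f :: M')).getD [])))
          ((pvPickList M' seen).map Prod.fst) = List.map
          (fun s => (s, pvMeta ((List.find? (fun g => pvSrc g == s) M').getD [])))
          ((pvPickList M' seen).map Prod.fst) := by
        refine List.map_congr_left ?_
        intro t ht
        rw [pvMem_pickKeys] at ht
        have htf : ((fun g => pvSrc g == t) f) ≠ true := by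
          rcases hf with hf | hf
          · simp [hf, Ne.symm ht.2.1]
          · simp
            rintro rfl
            exact ht.1 hf
        rw [List.find?_cons_of_neg (p := fun g => pvSrc g == t) (a := f) htf]
      rw [hcong]
      exact ih seen
    · rw [List.map_cons, List.map_cons]
      congr 1
      · rw [List.find?_cons_of_pos (p := fun g => pvSrc g == pvSrc f) (a := f) (by simp)]
        rfl
      · have hcong : List.map
            (fun s => (s, pvMeta ((List.find? (fun g => pvSrc g == s) (f :: M')).getD [])))
            ((pvPickList M' (pvSrc f :: seen)).map Prod.fst) = List.map
            (fun s => (s, pvMeta ((List.find? (fun g => pvSrc g == s) M').getD [])))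
            ((pvPickList M' (pvSrc f :: seen)).map Prod.fst) := by
          refine List.map_congr_left ?_
          intro t ht
          rw [pvMem_pickKeys] at ht
          have htf : ((fun g => pvSrc g == t) f) ≠ true := by
            simp
            rintro rfl
            exact ht.1 List.mem_cons_self
          rw [List.find?_cons_of_neg (p := fun g => pvSrc g == t) (a := f) htf]
        rw [hcong]
        exact ih _

-- ===== VERDICT helper: the full equivalence =====

theorem pvMain (xs : List (List (String × String))) :
    finding_metadata_by_source_py xs = finding_metadata_by_source_py_alt xs := by
  show ((PySem.List.sorted2 xs pvSrc pvId false).foldl pvAStep PySem.Dict.empty).items =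
    (PySem.List.sorted
        (PySem.Set.ofList ((xs.filter (fun f => ¬ pvSrc f = "")).map pvSrc)) (fun s => s) false).map
      (fun s => (s, pvMeta ((pvBestFor xs s).getD [])))
  set M := PySem.List.sorted2 xs pvSrc pvId false with hM
  have hitems : (M.foldl pvAStep PySem.Dict.empty).items = pvPickList M [] := by
    rw [pvItems_foldl_astep]
    rfl
  have hperm : ((pvPickList M []).map Prod.fst).Perm
      (PySem.Set.ofList ((xs.filter (fun f => ¬ pvSrc f = "")).map pvSrc)) := by
    rw [List.perm_ext_iff_of_nodup (pvNodup_pickKeys M []) (PySem.Set.nodup_ofList _)]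
    intro t
    rw [pvMem_pickKeys, PySem.Set.mem_ofList]
    simp only [List.mem_map, List.mem_filter, decide_eq_true_eq]
    constructor
    · rintro ⟨_, h1, g, hg, h2⟩
      exact ⟨g, ⟨(PySem.List.sorted2_perm xs pvSrc pvId false).mem_iff.mp hg, h2 ▸ h1⟩, h2⟩
    · rintro ⟨g, ⟨hg, h1⟩, h2⟩
      exact ⟨by simp, h2 ▸ h1, g,
        (PySem.List.sorted2_perm xs pvSrc pvId false).mem_iff.mpr hg, h2⟩
  have hpw : ((pvPickList M []).map Prod.fst).Pairwise (· ≤ ·) := by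
    have h1 : (M.map pvSrc).Pairwise (· ≤ ·) := by
      rw [List.pairwise_map]
      exact (pvPairwise_sorted2 xs).imp pvLexLe_src
    exact h1.sublist (pvPickKeys_sublist M [])
  have hsorted : PySem.List.sorted
      (PySem.Set.ofList ((xs.filter (fun f => ¬ pvSrc f = "")).map pvSrc)) (fun s => s) false =
      (pvPickList M []).map Prod.fst :=
    PySem.List.sorted_id_eq_of_perm_of_pairwise _ _ hperm hpw
  rw [hitems, hsorted]
  conv_lhs => rw [pvPickList_eq_map_find M []]
  refine List.map_congr_left ?_
  intro t ht
  rw [hM, pvMainFind xs t]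

-- ===== VERDICT (by name: the statement is the Claim_ definition above) =====
theorem finding_metadata_by_source_py_spec : Claim_equal_finding_metadata_by_source_py := by
  intro xs _
  unfold Spec_finding_metadata_by_source_py
  exact pvMain xs
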